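-- pv_equiv track=rewrite | github.com/Noor-Nasri/daily-leetcode | 1800-concatenation-of-consecutive-binary-numbers/concatenation-of-consecutive-binary-numbers.py | concatenatedBinary
-- ===== SOURCE A (Python) =====
-- def concatenatedBinary(n: int) -> int:
--     total = 0
--     curDigVal = 1
--     MODVAL = 10**9 + 7
--
--     for val in range(n, 0, -1):
--         while val:
--             if val % 2:
--                 total = (total + curDigVal) % MODVAL
--
--             val //= 2
--             curDigVal = (curDigVal * 2) % MODVAL
--
--     return total
-- ===== SOURCE B (Python) =====
-- def concatenatedBinary(n: int) -> int:
--     if n < 1: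
--         return 0
--     s = ''.join(bin(i)[2:] for i in range(1, n + 1))
--     return int(s, 2) % (10**9 + 7)
-- ===== Notes on version B (the rewrite author's own statement) =====
-- stated objective: idiomatic
-- what changed: B builds the whole binary concatenation as a string via join and bin and performs one base-two int conversion followed by a single final modular reduction, instead of A's per-bit accumulation over a descending range with a running power-of-two weight reduced modulo the prime at every bit.
import Mathlib
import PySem

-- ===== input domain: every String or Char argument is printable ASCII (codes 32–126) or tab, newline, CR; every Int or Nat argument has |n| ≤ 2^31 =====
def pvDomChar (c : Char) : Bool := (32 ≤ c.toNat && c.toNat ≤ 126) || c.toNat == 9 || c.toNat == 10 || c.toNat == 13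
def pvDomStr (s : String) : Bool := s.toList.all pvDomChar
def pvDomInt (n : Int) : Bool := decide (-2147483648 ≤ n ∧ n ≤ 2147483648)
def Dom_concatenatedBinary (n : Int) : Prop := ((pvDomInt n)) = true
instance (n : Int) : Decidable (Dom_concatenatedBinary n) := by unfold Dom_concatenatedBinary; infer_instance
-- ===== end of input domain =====

-- B builds the whole binary concatenation as a string (join/bin) and converts it once with
-- int(s, 2) and a single final modular reduction, instead of A's per-bit modular accumulation.

-- ===== PORT A =====
def pvM : Int := 1000000007

-- A's inner 'while val:' loop on state (total, curDigVal); val comes from range(n, 0, -1),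
-- so it is a nonnegative int and the loop is structural recursion on its Nat value.
def pvInner : Nat → Int × Int → Int × Int
  | 0, s => s
  | v+1, s =>
      pvInner ((v+1)/2)
        ((if (v+1) % 2 = 1 then (s.1 + s.2) % pvM else s.1), (s.2 * 2) % pvM)
decreasing_by exact Nat.div_lt_self (Nat.succ_pos v) one_lt_two

def concatenatedBinary (n : Int) : Int :=
  ((PySem.List.pyRange n 0 (-1)).foldl (fun s val => pvInner val.toNat s) ((0 : Int), (1 : Int))).1

-- ===== PORT B =====
-- bin(i)[2:] for a nonnegative int i: binary digits, most significant first (exact for i ≥ 0).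
def pvBin : Nat → List Char
  | 0 => ['0']
  | 1 => ['1']
  | v+2 => pvBin ((v+2)/2) ++ [if (v+2) % 2 = 1 then '1' else '0']
decreasing_by exact Nat.div_lt_self (Nat.succ_pos (v+1)) one_lt_two

-- int(s, 2): exact on strings of '0'/'1' digits, which is the only shape B feeds it.
def pvParse (cs : List Char) : Int :=
  cs.foldl (fun a c => a * 2 + (if c = '1' then 1 else 0)) 0

def concatenatedBinary_alt (n : Int) : Int :=
  if n < 1 then 0
  else pvParse (((PySem.List.pyRange 1 (n+1) 1).map (fun i => pvBin i.toNat)).flatten) % pvM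

-- ===== PRECONDITION & SPEC =====
def Spec_concatenatedBinary (n : Int) (out : Int) : Prop := out = concatenatedBinary_alt n
instance (n : Int) (out : Int) : Decidable (Spec_concatenatedBinary n out) := by unfold Spec_concatenatedBinary; infer_instance

-- ===== CLAIM (what is proved, stated in full; the proofs are below) =====
def Claim_equal_concatenatedBinary : Prop := ∀ (n : Int), Dom_concatenatedBinary n → Spec_concatenatedBinary n (concatenatedBinary n)

-- ===== LEMMAS AND PROOFS =====

-- concatenation of bin(1)..bin(m), proof-side normal form of B's string
def pvCat (m : Nat) : List Char := ((List.range m).map (fun k => pvBin (k+1))).flatten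

theorem emod_modEq (a : Int) : a % pvM ≡ a [ZMOD pvM] :=
  Int.emod_emod_of_dvd a dvd_rfl

theorem pvBin_one : pvBin 1 = ['1'] := by rw [pvBin]

theorem pvInner_zero (s : Int × Int) : pvInner 0 s = s := by rw [pvInner]

theorem pvParse_shift (ys : List Char) : ∀ a : Int,
    ys.foldl (fun a c => a * 2 + (if c = '1' then 1 else 0)) a
      = a * 2 ^ ys.length + pvParse ys := by
  induction ys with
  | nil =>
      intro a
      simp only [List.foldl_nil, List.length_nil, pow_zero, mul_one, pvParse]
      ring
  | cons c ys ih =>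
      intro a
      have hp : pvParse (c :: ys)
          = (if c = '1' then (1:Int) else 0) * 2 ^ ys.length + pvParse ys := by
        rw [pvParse, List.foldl_cons, ih]
        ring
      rw [List.foldl_cons, ih, hp, List.length_cons]
      ring

theorem pvParse_append (xs ys : List Char) :
    pvParse (xs ++ ys) = pvParse xs * 2 ^ ys.length + pvParse ys := by
  simp only [pvParse, List.foldl_append]
  exact pvParse_shift ys _

theorem pvBin_len (v : Nat) (h : 2 ≤ v) :
    (pvBin v).length = (pvBin (v/2)).length + 1 := by
  match v, h with
  | v+2, _ => rw [pvBin]; simp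

theorem pvParse_pvBin (v : Nat) : pvParse (pvBin v) = (v : Int) := by
  induction v using Nat.strong_induction_on with
  | _ v ih =>
    match v with
    | 0 => rw [pvBin]; simp [pvParse]
    | 1 => rw [pvBin]; simp [pvParse]
    | v+2 =>
        rw [pvBin, pvParse_append, ih ((v+2)/2) (Nat.div_lt_self (by omega) one_lt_two)]
        have h := Nat.div_add_mod (v+2) 2
        rcases Nat.mod_two_eq_zero_or_one (v+2) with h2 | h2 <;>
          · simp only [h2, pvParse, List.foldl_cons, List.foldl_nil, List.length_cons,
              List.length_nil, if_true]
            norm_num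
            push_cast
            omega

theorem pvInner_spec (v : Nat) (hv : 1 ≤ v) : ∀ t c : Int,
    pvInner v (t, c) = ((t + v * c) % pvM, (c * 2 ^ (pvBin v).length) % pvM) := by
  induction v using Nat.strong_induction_on with
  | _ v ih =>
    intro t c
    match v, hv with
    | 1, _ =>
        rw [pvInner]
        dsimp only
        rw [pvInner_zero, pvBin_one]
        norm_num
    | v+2, _ =>
        rw [pvInner]
        dsimp only
        rw [ih ((v+2)/2) (Nat.div_lt_self (by omega) one_lt_two) (by omega)]
        have hvi : ((v+2 : Nat) : Int) = 2 * (((v+2)/2 : Nat) : Int) + (((v+2) % 2 : Nat) : Int) := by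
          have := Nat.div_add_mod (v+2) 2
          push_cast
          omega
        simp only [Prod.mk.injEq]
        refine ⟨?_, ?_⟩
        · -- first component
          have h1 : (if (v+2) % 2 = 1 then (t + c) % pvM else t)
              ≡ t + (((v+2) % 2 : Nat) : Int) * c [ZMOD pvM] := by
            rcases Nat.mod_two_eq_zero_or_one (v+2) with h2 | h2 <;> simp [h2]
            exact emod_modEq (t + c)
          have h2 : (((v+2)/2 : Nat) : Int) * ((c * 2) % pvM)
              ≡ (((v+2)/2 : Nat) : Int) * (c * 2) [ZMOD pvM] :=
            Int.ModEq.mul_left _ (emod_modEq (c * 2))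
          have h3 := Int.ModEq.add h1 h2
          have h4 : t + (((v+2) % 2 : Nat) : Int) * c + (((v+2)/2 : Nat) : Int) * (c * 2)
              = t + ((v+2 : Nat) : Int) * c := by rw [hvi]; ring
          rw [← h4]
          exact h3
        · -- second component
          have h1 : ((c * 2) % pvM) * 2 ^ (pvBin ((v+2)/2)).length
              ≡ (c * 2) * 2 ^ (pvBin ((v+2)/2)).length [ZMOD pvM] :=
            Int.ModEq.mul_right _ (emod_modEq (c * 2))
          have h2 : (c * 2) * 2 ^ (pvBin ((v+2)/2)).length
              = c * 2 ^ (pvBin (v+2)).length := by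
            rw [pvBin_len (v+2) (by omega)]
            ring
          rw [← h2]
          exact h1

theorem pvCat_succ (m : Nat) : pvCat (m+1) = pvCat m ++ pvBin (m+1) := by
  simp [pvCat, List.range_succ]

theorem foldA_spec (m : Nat) (hm : 1 ≤ m) : ∀ t c : Int,
    (PySem.List.pyRange (m : Int) 0 (-1)).foldl (fun s val => pvInner val.toNat s) (t, c)
      = ((t + pvParse (pvCat m) * c) % pvM, (c * 2 ^ (pvCat m).length) % pvM) := by
  induction m with
  | zero => omega
  | succ m ih =>
    intro t c
    have hcons : PySem.List.pyRange ((m+1 : Nat) : Int) 0 (-1)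
        = ((m+1 : Nat) : Int) :: PySem.List.pyRange (((m+1 : Nat) : Int) - 1) 0 (-1) :=
      PySem.List.pyRange_neg_one_cons (by push_cast; omega)
    have hm1 : (((m+1 : Nat) : Int) - 1) = (m : Int) := by push_cast; ring
    rw [hcons, hm1]
    simp only [List.foldl_cons]
    have htn : (((m+1 : Nat) : Int)).toNat = m + 1 := by simp
    rw [htn, pvInner_spec (m+1) (by omega)]
    rcases Nat.eq_zero_or_pos m with h0 | h1
    · subst h0
      rw [PySem.List.pyRange_neg_one_eq_nil (by norm_num)]
      simp only [List.foldl_nil]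
      have hc1 : pvCat 1 = pvBin 1 := by simp [pvCat]
      rw [hc1, pvParse_pvBin]
    · rw [ih h1]
      rw [pvCat_succ, pvParse_append, pvParse_pvBin]
      simp only [Prod.mk.injEq]
      refine ⟨?_, ?_⟩
      · have h1' : (t + ((m+1 : Nat) : Int) * c) % pvM + pvParse (pvCat m) * ((c * 2 ^ (pvBin (m+1)).length) % pvM)
            ≡ (t + ((m+1 : Nat) : Int) * c) + pvParse (pvCat m) * (c * 2 ^ (pvBin (m+1)).length) [ZMOD pvM] :=
          Int.ModEq.add (emod_modEq _) (Int.ModEq.mul_left _ (emod_modEq _))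
        have h2' : (t + ((m+1 : Nat) : Int) * c) + pvParse (pvCat m) * (c * 2 ^ (pvBin (m+1)).length)
            = t + (pvParse (pvCat m) * 2 ^ (pvBin (m+1)).length + ((m+1 : Nat) : Int)) * c := by ring
        rw [← h2']
        exact h1'
      · have h1' : ((c * 2 ^ (pvBin (m+1)).length) % pvM) * 2 ^ (pvCat m).length
            ≡ (c * 2 ^ (pvBin (m+1)).length) * 2 ^ (pvCat m).length [ZMOD pvM] :=
          Int.ModEq.mul_right _ (emod_modEq _)
        have h2' : (c * 2 ^ (pvBin (m+1)).length) * 2 ^ (pvCat m).length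
            = c * 2 ^ (pvCat m ++ pvBin (m+1)).length := by
          rw [List.length_append, pow_add]
          ring
        rw [← h2']
        exact h1'

theorem alt_flatten (m : Nat) :
    ((PySem.List.pyRange 1 ((m : Int)+1) 1).map (fun i => pvBin i.toNat)).flatten = pvCat m := by
  rw [PySem.List.pyRange_one]
  have h : ((m : Int) + 1 - 1).toNat = m := by simp
  rw [h, List.map_map]
  unfold pvCat
  congr 1
  apply List.map_congr_left
  intro k _
  simp only [Function.comp]
  congr 1
  omega

-- ===== VERDICT (by name: the statement is the Claim_ definition above) =====
theorem concatenatedBinary_spec : Claim_equal_concatenatedBinary := by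
  intro n _
  show concatenatedBinary n = concatenatedBinary_alt n
  unfold concatenatedBinary concatenatedBinary_alt
  by_cases hn : n < 1
  · rw [if_pos hn, PySem.List.pyRange_neg_one_eq_nil (by omega)]
    rfl
  · rw [if_neg hn]
    have hm : n = ((n.toNat : Nat) : Int) := (Int.toNat_of_nonneg (by omega)).symm
    rw [hm, foldA_spec n.toNat (by omega), alt_flatten]
    show (0 + pvParse (pvCat n.toNat) * 1) % pvM = pvParse (pvCat n.toNat) % pvM
    ring_nf
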